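-- pv_equiv track=rewrite | github.com/Nejrup/KiCAD-MCP-Server | python/commands/design_rules.py | _calculate_violation_diff
-- ===== SOURCE A (Python) =====
-- from typing import Dict, Any, Optional, List, Tuple
--
-- def _calculate_violation_diff(
--
--     previous: Optional[Dict[str, Any]],
--     current: Dict[str, Any],
-- ) -> Dict[str, Any]:
--     prev_signatures = previous.get("signature_counts", {}) if previous else {}
--     curr_signatures = current.get("signature_counts", {})
--
--     new_count = 0
--     resolved_count = 0
--     persisting_count = 0
--
--     for signature, curr_qty in curr_signatures.items():
--         prev_qty = int(prev_signatures.get(signature, 0))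
--         curr_qty_int = int(curr_qty)
--         if curr_qty_int > prev_qty:
--             new_count += curr_qty_int - prev_qty
--         if prev_qty > 0:
--             persisting_count += min(prev_qty, curr_qty_int)
--
--     for signature, prev_qty in prev_signatures.items():
--         curr_qty = int(curr_signatures.get(signature, 0))
--         prev_qty_int = int(prev_qty)
--         if prev_qty_int > curr_qty:
--             resolved_count += prev_qty_int - curr_qty
--
--     return {
--         "new": new_count,
--         "resolved": resolved_count,
--         "persisting": persisting_count,
--     }
-- ===== SOURCE B (Python) =====
-- def _calculate_violation_diff(previous, current):
--     # One consuming pass over current signatures against a shrinking copy of the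
--     # previous map, then a sweep of the leftover (resolved-only) signatures.
--     prev_map = dict((previous or {}).get("signature_counts", {}))
--     curr_map = current.get("signature_counts", {})
--
--     new = resolved = persisting = 0
--     for sig, qty in curr_map.items():
--         c = int(qty)
--         if sig in prev_map:
--             p = int(prev_map.pop(sig))
--             new += max(0, c - p)
--             resolved += max(0, p - c)
--             if p > 0:
--                 persisting += min(p, c)
--         else:
--             new += max(0, c)
--     for qty in prev_map.values():
--         resolved += max(0, int(qty))
--
--     return {"new": new, "resolved": resolved, "persisting": persisting}
-- ===== Notes on version B (the rewrite author's own statement) =====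
-- stated objective: alternative
-- what changed: A makes two full directional scans (current-vs-previous for new/persisting, previous-vs-current for resolved) with conditional accumulation; B makes one consuming pass over the current map that pops matched signatures out of a copy of the previous map, accumulating new/resolved/persisting with max/min arithmetic, then sweeps the leftover previous-only signatures for resolved. Pre_ only excludes association lists whose signature map carries a duplicate key, which do not represent a Python dict (no Python input reaches them).
import Mathlib
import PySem

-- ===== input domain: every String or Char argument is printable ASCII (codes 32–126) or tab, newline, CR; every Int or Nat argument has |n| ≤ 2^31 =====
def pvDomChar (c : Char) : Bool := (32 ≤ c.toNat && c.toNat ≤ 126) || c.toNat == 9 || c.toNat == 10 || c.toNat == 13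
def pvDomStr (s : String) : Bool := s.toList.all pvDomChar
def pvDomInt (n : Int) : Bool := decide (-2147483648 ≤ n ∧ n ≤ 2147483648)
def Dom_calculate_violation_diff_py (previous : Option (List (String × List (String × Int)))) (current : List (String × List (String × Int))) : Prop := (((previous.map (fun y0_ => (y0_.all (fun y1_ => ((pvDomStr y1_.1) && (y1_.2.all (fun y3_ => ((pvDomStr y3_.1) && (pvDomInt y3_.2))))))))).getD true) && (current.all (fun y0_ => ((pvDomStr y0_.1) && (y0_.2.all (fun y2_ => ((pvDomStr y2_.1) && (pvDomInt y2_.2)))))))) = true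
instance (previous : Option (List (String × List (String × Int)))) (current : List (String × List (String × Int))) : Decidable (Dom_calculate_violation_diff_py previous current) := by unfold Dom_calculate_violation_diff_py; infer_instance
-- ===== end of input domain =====

-- B replaces A's two directional scans by one consuming pass over the current map (popping matched
-- signatures out of a copy of the previous map) plus a leftover sweep; same return value (alternative
-- decomposition, no speed claim).

-- ===== PORT A =====
-- prev_signatures = previous.get("signature_counts", {}) if previous else {}   (some [] is falsy too)
def pvPrevSigs (previous : Option (List (String × List (String × Int)))) : List (String × Int) :=
  match previous with
  | some d => if d.isEmpty then [] else (PySem.Dict.mk d).getD "signature_counts" []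
  | none => []

def calculate_violation_diff_py (previous : Option (List (String × List (String × Int)))) (current : List (String × List (String × Int))) : List (String × Int) :=
  let prev_signatures : List (String × Int) := pvPrevSigs previous
  let curr_signatures : List (String × Int) := (PySem.Dict.mk current).getD "signature_counts" []
  -- first loop: (new_count, persisting_count)
  let np : Int × Int := curr_signatures.foldl (fun st sq =>
      let prev_qty : Int := (PySem.Dict.mk prev_signatures).getD sq.1 0
      let curr_qty_int : Int := sq.2
      let st1 := if curr_qty_int > prev_qty then (st.1 + (curr_qty_int - prev_qty), st.2) else st
      if prev_qty > 0 then (st1.1, st1.2 + min prev_qty curr_qty_int) else st1) (0, 0)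
  -- second loop: resolved_count
  let resolved : Int := prev_signatures.foldl (fun r sp =>
      let curr_qty : Int := (PySem.Dict.mk curr_signatures).getD sp.1 0
      if sp.2 > curr_qty then r + (sp.2 - curr_qty) else r) 0
  [("new", np.1), ("resolved", resolved), ("persisting", np.2)]

-- ===== PORT B =====
def calculate_violation_diff_py_alt (previous : Option (List (String × List (String × Int)))) (current : List (String × List (String × Int))) : List (String × Int) :=
  -- prev_map = dict((previous or {}).get("signature_counts", {}))
  let prev_map0 : PySem.Dict String Int :=
    PySem.Dict.mk ((PySem.Dict.mk (previous.getD [])).getD "signature_counts" [])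
  let curr_map : List (String × Int) := (PySem.Dict.mk current).getD "signature_counts" []
  -- state: ((new, resolved, persisting), prev_map)
  let st : (Int × Int × Int) × PySem.Dict String Int :=
    curr_map.foldl (fun st sq =>
      match st.2.pop? sq.1 with
      | some pd =>
          ((st.1.1 + max 0 (sq.2 - pd.1),
            st.1.2.1 + max 0 (pd.1 - sq.2),
            st.1.2.2 + (if pd.1 > 0 then min pd.1 sq.2 else 0)), pd.2)
      | none => ((st.1.1 + max 0 sq.2, st.1.2.1, st.1.2.2), st.2)) ((0, 0, 0), prev_map0)
  let resolved : Int := st.2.values.foldl (fun r p => r + max 0 p) 0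
  [("new", st.1.1), ("resolved", st.1.2.1 + resolved), ("persisting", st.1.2.2)]

-- ===== PRECONDITION & SPEC =====
-- Pre_ excludes inputs whose extracted signature map (an association list standing for a Python dict)
-- repeats a signature key: such lists do not represent any Python dict, and the ports' list-level
-- behaviour on them is accidental. Every input translated from an actual Python dict satisfies Pre_.
def Pre_calculate_violation_diff_py (previous : Option (List (String × List (String × Int)))) (current : List (String × List (String × Int))) : Prop :=
  ((((PySem.Dict.mk (previous.getD [])).getD "signature_counts" []).map Prod.fst).Nodup) ∧
  ((((PySem.Dict.mk current).getD "signature_counts" []).map Prod.fst).Nodup)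
instance (previous : Option (List (String × List (String × Int)))) (current : List (String × List (String × Int))) : Decidable (Pre_calculate_violation_diff_py previous current) := by unfold Pre_calculate_violation_diff_py; infer_instance

def pvWitness_calculate_violation_diff_py : (Option (List (String × List (String × Int)))) × (List (String × List (String × Int))) :=
  (some [("signature_counts", [("a", 2), ("b", 1)])], [("signature_counts", [("a", 3), ("c", -1)])])

def Spec_calculate_violation_diff_py (previous : Option (List (String × List (String × Int)))) (current : List (String × List (String × Int))) (out : List (String × Int)) : Prop := out = calculate_violation_diff_py_alt previous current
instance (previous : Option (List (String × List (String × Int)))) (current : List (String × List (String × Int))) (out : List (String × Int)) : Decidable (Spec_calculate_violation_diff_py previous current out) := by unfold Spec_calculate_violation_diff_py; infer_instance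

-- ===== CLAIM (what is proved, stated in full; the proofs are below) =====
def Claim_equal_calculate_violation_diff_py : Prop := ∀ (previous : Option (List (String × List (String × Int)))) (current : List (String × List (String × Int))), Dom_calculate_violation_diff_py previous current → Pre_calculate_violation_diff_py previous current → Spec_calculate_violation_diff_py previous current (calculate_violation_diff_py previous current)

-- ===== LEMMAS AND PROOFS =====


def pvGet (m : List (String × Int)) (s : String) : Int := (PySem.Dict.mk m).getD s 0
def pvHas (m : List (String × Int)) (s : String) : Bool := (PySem.Dict.mk m).contains s

theorem pvGet_cons (q : String × Int) (t : List (String × Int)) (s : String) :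
    pvGet (q :: t) s = if q.1 = s then q.2 else pvGet t s := by
  by_cases h : q.1 = s <;>
    simp [pvGet, PySem.Dict.getD, PySem.Dict.get?, h]

theorem pvHas_cons (q : String × Int) (t : List (String × Int)) (s : String) :
    pvHas (q :: t) s = if q.1 = s then true else pvHas t s := by
  by_cases h : q.1 = s <;> simp [pvHas, PySem.Dict.contains, List.any_cons, h]

theorem pvGet_eq_zero_of_not_has (P : List (String × Int)) (s : String)
    (h : pvHas P s = false) : pvGet P s = 0 := by
  induction P with
  | nil => rfl
  | cons q t ih =>
    rw [pvHas_cons] at h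
    rw [pvGet_cons]
    by_cases hq : q.1 = s
    · simp [hq] at h
    · simp [hq] at h ⊢; exact ih h

theorem pvHas_iff_mem (P : List (String × Int)) (s : String) :
    pvHas P s = true ↔ s ∈ P.map Prod.fst := by
  induction P with
  | nil => simp [pvHas, PySem.Dict.contains]
  | cons q t ih =>
    rw [pvHas_cons]
    by_cases hq : q.1 = s
    · simp [hq]
    · simp [hq, ih]
      intro e; exact absurd e.symm hq

theorem pvGet_of_mem (P : List (String × Int)) (s : String) (p : Int)
    (hP : (P.map Prod.fst).Nodup) (hm : (s, p) ∈ P) : pvGet P s = p :=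
  PySem.Dict.getD_of_mem_items (d := PySem.Dict.mk P) hm hP 0

theorem pvGet_filter_ne (P : List (String × Int)) (k k' : String) (h : k' ≠ k) :
    pvGet (P.filter (fun p => !(p.1 == k))) k' = pvGet P k' := by
  induction P with
  | nil => rfl
  | cons q t ih =>
    by_cases hk : q.1 = k
    · rw [List.filter_cons_of_neg (by simp [hk]), pvGet_cons,
        if_neg (fun e : q.1 = k' => h (hk ▸ e ▸ rfl))]
      exact ih
    · rw [List.filter_cons_of_pos (by simp [hk]), pvGet_cons, pvGet_cons]
      by_cases hq : q.1 = k' <;> simp [hq, ih]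

theorem pvHas_filter_ne (P : List (String × Int)) (k k' : String) (h : k' ≠ k) :
    pvHas (P.filter (fun p => !(p.1 == k))) k' = pvHas P k' := by
  induction P with
  | nil => rfl
  | cons q t ih =>
    by_cases hk : q.1 = k
    · rw [List.filter_cons_of_neg (by simp [hk]), pvHas_cons,
        if_neg (fun e : q.1 = k' => h (hk ▸ e ▸ rfl))]
      exact ih
    · rw [List.filter_cons_of_pos (by simp [hk]), pvHas_cons, pvHas_cons]
      by_cases hq : q.1 = k' <;> simp [hq, ih]

theorem pvFilter_eq_self_of_not_has (P : List (String × Int)) (k : String)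
    (h : pvHas P k = false) : P.filter (fun p => !(p.1 == k)) = P := by
  induction P with
  | nil => rfl
  | cons q t ih =>
    rw [pvHas_cons] at h
    by_cases hq : q.1 = k
    · simp [hq] at h
    · simp [hq] at h
      rw [List.filter_cons_of_pos (by simp [hq]), ih h]

theorem pvNodup_filter (P : List (String × Int)) (q : String × Int → Bool)
    (hP : (P.map Prod.fst).Nodup) : ((P.filter q).map Prod.fst).Nodup :=
  ((List.filter_sublist (l := P) (p := q)).map Prod.fst).nodup hP

theorem pvSum_split (l : List (String × Int)) (f : String × Int → Int) (q : String × Int → Bool) :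
    (l.map f).sum = ((l.filter q).map f).sum + ((l.filter (fun x => !q x)).map f).sum := by
  induction l with
  | nil => simp
  | cons a t ih =>
    by_cases h : q a = true
    · simp [h, ih]; ring
    · simp [h, ih]; ring

def pvNewSum (P C : List (String × Int)) : Int :=
  (C.map (fun sq => max 0 (sq.2 - pvGet P sq.1))).sum
def pvResSumC (P C : List (String × Int)) : Int :=
  (C.map (fun sq => if pvHas P sq.1 then max 0 (pvGet P sq.1 - sq.2) else 0)).sum
def pvPerSum (P C : List (String × Int)) : Int :=
  (C.map (fun sq => if pvGet P sq.1 > 0 then min (pvGet P sq.1) sq.2 else 0)).sum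
def pvLeft (P C : List (String × Int)) : List (String × Int) :=
  P.filter (fun p => !(C.map Prod.fst).contains p.1)

-- A's first loop computes (new, persisting) as the two sums
theorem pvA_loop1 (P C : List (String × Int)) (st : Int × Int) :
    C.foldl (fun st sq =>
      let prev_qty : Int := (PySem.Dict.mk P).getD sq.1 0
      let curr_qty_int : Int := sq.2
      let st1 := if curr_qty_int > prev_qty then (st.1 + (curr_qty_int - prev_qty), st.2) else st
      if prev_qty > 0 then (st1.1, st1.2 + min prev_qty curr_qty_int) else st1) st
    = (st.1 + pvNewSum P C, st.2 + pvPerSum P C) := by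
  induction C generalizing st with
  | nil => simp [pvNewSum, pvPerSum]
  | cons sq t ih =>
    rw [List.foldl_cons, ih]
    have hg : (PySem.Dict.mk P).getD sq.1 0 = pvGet P sq.1 := rfl
    simp only [pvNewSum, pvPerSum, List.map_cons, List.sum_cons, hg]
    apply Prod.ext <;> simp <;> split_ifs <;> simp <;> omega

-- A's second loop computes resolved as a sum
theorem pvA_loop2 (C P : List (String × Int)) (r : Int) :
    P.foldl (fun r sp =>
      let curr_qty : Int := (PySem.Dict.mk C).getD sp.1 0
      if sp.2 > curr_qty then r + (sp.2 - curr_qty) else r) r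
    = r + (P.map (fun sp => max 0 (sp.2 - pvGet C sp.1))).sum := by
  induction P generalizing r with
  | nil => simp
  | cons sp t ih =>
    rw [List.foldl_cons, ih]
    have hg : (PySem.Dict.mk C).getD sp.1 0 = pvGet C sp.1 := rfl
    simp only [List.map_cons, List.sum_cons, hg]
    split_ifs <;> omega

theorem pvLeft_cons (P : List (String × Int)) (s : String) (c : Int) (t : List (String × Int)) :
    pvLeft P ((s, c) :: t) = pvLeft (P.filter (fun p => !(p.1 == s))) t := by
  simp only [pvLeft, List.map_cons, List.filter_filter]
  apply List.filter_congr
  intro x _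
  by_cases h1 : x.1 = s <;> by_cases h2 : x.1 ∈ t.map Prod.fst <;>
    simp [List.contains_cons, h1, h2]

theorem pvGet_erase (d : PySem.Dict String Int) (s : String) (k : String) (h : k ≠ s) :
    pvGet (d.erase s).items k = pvGet d.items k := by
  have : (d.erase s).items = d.items.filter (fun p => !(p.1 == s)) := rfl
  rw [this, pvGet_filter_ne _ _ _ h]

theorem pvHas_erase (d : PySem.Dict String Int) (s : String) (k : String) (h : k ≠ s) :
    pvHas (d.erase s).items k = pvHas d.items k := by
  have : (d.erase s).items = d.items.filter (fun p => !(p.1 == s)) := rfl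
  rw [this, pvHas_filter_ne _ _ _ h]

-- B's loop: one consuming pass = the three sums plus the leftover dict
theorem pvB_loop (C : List (String × Int)) (d : PySem.Dict String Int) (acc : Int × Int × Int)
    (hC : (C.map Prod.fst).Nodup) :
    C.foldl (fun st sq =>
      match st.2.pop? sq.1 with
      | some pd =>
          ((st.1.1 + max 0 (sq.2 - pd.1),
            st.1.2.1 + max 0 (pd.1 - sq.2),
            st.1.2.2 + (if pd.1 > 0 then min pd.1 sq.2 else 0)), pd.2)
      | none => ((st.1.1 + max 0 sq.2, st.1.2.1, st.1.2.2), st.2)) (acc, d)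
    = ((acc.1 + pvNewSum d.items C, acc.2.1 + pvResSumC d.items C, acc.2.2 + pvPerSum d.items C),
       PySem.Dict.mk (pvLeft d.items C)) := by
  induction C generalizing d acc with
  | nil => simp [pvNewSum, pvResSumC, pvPerSum, pvLeft]
  | cons sq t ih =>
    obtain ⟨s, c⟩ := sq
    simp only [List.map_cons, List.nodup_cons, List.mem_map] at hC
    have hnt : s ∉ t.map Prod.fst := by
      simpa [List.mem_map] using hC.1
    rw [List.foldl_cons]
    cases hs : d.get? s with
    | some p =>
      have hstep : (PySem.Dict.pop? d s) = some (p, d.erase s) := by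
        simp [PySem.Dict.pop?, hs]
      have hgp : pvGet d.items s = p := by
        simp [pvGet, PySem.Dict.getD]
        have : (PySem.Dict.mk d.items) = d := rfl
        rw [this, hs]; rfl
      have hhp : pvHas d.items s = true := by
        have : (PySem.Dict.mk d.items) = d := rfl
        simp [pvHas, this, PySem.Dict.contains_eq_isSome_get?, hs]
      simp only [hstep]
      rw [ih (d.erase s) _ hC.2]
      have hmapN : pvNewSum (d.erase s).items t = pvNewSum d.items t := by
        unfold pvNewSum
        congr 1
        apply List.map_congr_left
        intro x hx
        rw [pvGet_erase _ _ _ (by rintro rfl; exact hnt (List.mem_map_of_mem hx))]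
      have hmapR : pvResSumC (d.erase s).items t = pvResSumC d.items t := by
        unfold pvResSumC
        congr 1
        apply List.map_congr_left
        intro x hx
        have hne : x.1 ≠ s := by rintro rfl; exact hnt (List.mem_map_of_mem hx)
        rw [pvGet_erase _ _ _ hne, pvHas_erase _ _ _ hne]
      have hmapP : pvPerSum (d.erase s).items t = pvPerSum d.items t := by
        unfold pvPerSum
        congr 1
        apply List.map_congr_left
        intro x hx
        have hne : x.1 ≠ s := by rintro rfl; exact hnt (List.mem_map_of_mem hx)
        rw [pvGet_erase _ _ _ hne]
      have hleft : pvLeft (d.erase s).items t = pvLeft d.items ((s, c) :: t) := by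
        rw [pvLeft_cons]; rfl
      rw [hmapN, hmapR, hmapP, hleft]
      simp only [pvNewSum, pvResSumC, pvPerSum, List.map_cons, List.sum_cons, hgp, hhp, if_pos rfl]
      simp only [Prod.mk.injEq, add_assoc]
      all_goals trivial
    | none =>
      have hstep : (PySem.Dict.pop? d s) = none := by
        simp [PySem.Dict.pop?, hs]
      have hhp : pvHas d.items s = false := by
        have : (PySem.Dict.mk d.items) = d := rfl
        simp [pvHas, this, PySem.Dict.contains_eq_isSome_get?, hs]
      have hgp : pvGet d.items s = 0 := pvGet_eq_zero_of_not_has _ _ hhp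
      simp only [hstep]
      rw [ih d _ hC.2]
      have hleft : pvLeft d.items ((s, c) :: t) = pvLeft d.items t := by
        rw [pvLeft_cons, pvFilter_eq_self_of_not_has _ _ hhp]
      rw [hleft]
      simp only [pvNewSum, pvResSumC, pvPerSum, List.map_cons, List.sum_cons, hgp, hhp]
      simp only [Prod.mk.injEq, Bool.false_eq_true, if_false, sub_zero, lt_self_iff_false,
        zero_add, add_assoc]

theorem pvSum_zero (l : List Int) (h : ∀ x ∈ l, x = 0) : l.sum = 0 := List.sum_eq_zero h

theorem pvHas_eq_false_iff (P : List (String × Int)) (s : String) :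
    pvHas P s = false ↔ s ∉ P.map Prod.fst := by
  rw [← Bool.not_eq_true, not_iff_not, pvHas_iff_mem]

theorem pvResolved_split (P C : List (String × Int))
    (hP : (P.map Prod.fst).Nodup) (hC : (C.map Prod.fst).Nodup) :
    (P.map (fun sp => max 0 (sp.2 - pvGet C sp.1))).sum
      = pvResSumC P C + ((pvLeft P C).map (fun p => max 0 p.2)).sum := by
  rw [pvSum_split P _ (fun p => (C.map Prod.fst).contains p.1)]
  have h2 : ((P.filter (fun x => !(C.map Prod.fst).contains x.1)).map
      (fun sp => max 0 (sp.2 - pvGet C sp.1))).sum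
      = ((pvLeft P C).map (fun p => max 0 p.2)).sum := by
    unfold pvLeft
    apply congrArg
    apply List.map_congr_left
    intro x hx
    have hmem : x.1 ∉ C.map Prod.fst := by
      have := (List.mem_filter.mp hx).2
      simpa using this
    rw [pvGet_eq_zero_of_not_has _ _ ((pvHas_eq_false_iff C x.1).mpr hmem), sub_zero]
  have h1 : ((P.filter (fun p => (C.map Prod.fst).contains p.1)).map
      (fun sp => max 0 (sp.2 - pvGet C sp.1))).sum = pvResSumC P C := by
    have e1 : ((P.filter (fun p => (C.map Prod.fst).contains p.1)).map
        (fun sp => max 0 (sp.2 - pvGet C sp.1))).sum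
        = (((P.filter (fun p => (C.map Prod.fst).contains p.1)).map Prod.fst).map
            (fun s => max 0 (pvGet P s - pvGet C s))).sum := by
      rw [List.map_map]
      apply congrArg
      apply List.map_congr_left
      intro x hx
      have hxP : x ∈ P := (List.mem_filter.mp hx).1
      have hx2 : pvGet P x.1 = x.2 := pvGet_of_mem P x.1 x.2 hP (by obtain ⟨a, b⟩ := x; exact hxP)
      simp [Function.comp, hx2]
    have e2 : pvResSumC P C
        = (((C.filter (fun sq => pvHas P sq.1)).map Prod.fst).map
            (fun s => max 0 (pvGet P s - pvGet C s))).sum := by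
      unfold pvResSumC
      rw [pvSum_split C _ (fun sq => pvHas P sq.1)]
      have hz : ((C.filter (fun x => !pvHas P x.1)).map
          (fun sq => if pvHas P sq.1 then max 0 (pvGet P sq.1 - sq.2) else 0)).sum = 0 := by
        apply pvSum_zero
        intro x hx
        obtain ⟨sq, hsq, rfl⟩ := List.mem_map.mp hx
        have : pvHas P sq.1 = false := by simpa using (List.mem_filter.mp hsq).2
        simp [this]
      rw [hz, add_zero, List.map_map]
      apply congrArg
      apply List.map_congr_left
      intro x hx
      have hxf := List.mem_filter.mp hx
      have hx2 : pvGet C x.1 = x.2 :=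
        pvGet_of_mem C x.1 x.2 hC (by obtain ⟨a, b⟩ := x; exact hxf.1)
      simp [Function.comp, hxf.2, hx2]
    have hperm : ((P.filter (fun p => (C.map Prod.fst).contains p.1)).map Prod.fst).Perm
        ((C.filter (fun sq => pvHas P sq.1)).map Prod.fst) := by
      have n1 := pvNodup_filter P (fun p => (C.map Prod.fst).contains p.1) hP
      have n2 := pvNodup_filter C (fun sq => pvHas P sq.1) hC
      rw [List.perm_ext_iff_of_nodup n1 n2]
      intro a
      simp only [List.mem_map, List.mem_filter]
      constructor
      · rintro ⟨p, ⟨hpP, hpC⟩, rfl⟩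
        have haC : p.1 ∈ C.map Prod.fst := by simpa using hpC
        obtain ⟨q, hqC, hq1⟩ := List.mem_map.mp haC
        exact ⟨q, ⟨hqC, by rw [pvHas_iff_mem, hq1]; exact List.mem_map_of_mem hpP⟩, hq1⟩
      · rintro ⟨q, ⟨hqC, hqP⟩, rfl⟩
        have haP : q.1 ∈ P.map Prod.fst := (pvHas_iff_mem P q.1).mp hqP
        obtain ⟨p, hpP, hp1⟩ := List.mem_map.mp haP
        exact ⟨p, ⟨hpP, by simp [hp1]; exact ⟨q.2, by simpa using hqC⟩⟩, hp1⟩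
    rw [e1, e2]
    exact (hperm.map _).sum_eq
  rw [h1, h2]

theorem pvValues_fold (L : List (String × Int)) (r : Int) :
    (PySem.Dict.mk L).values.foldl (fun r p => r + max 0 p) r
      = r + (L.map (fun p => max 0 p.2)).sum := by
  have hv : (PySem.Dict.mk L).values = L.map (fun p => p.2) := rfl
  rw [hv]
  induction L generalizing r with
  | nil => simp
  | cons a t ih => simp [ih]; ring

theorem pvPrevEq (previous : Option (List (String × List (String × Int)))) :
    (PySem.Dict.mk (previous.getD [])).getD "signature_counts" [] = pvPrevSigs previous := by
  cases previous with
  | none => rfl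
  | some d => cases d with
    | nil => rfl
    | cons a t => rfl

-- ===== VERDICT (by name: the statement is the Claim_ definition above) =====
theorem calculate_violation_diff_py_spec : Claim_equal_calculate_violation_diff_py := by
  intro previous current _ hPre
  unfold Pre_calculate_violation_diff_py at hPre
  rw [pvPrevEq] at hPre
  obtain ⟨hP, hC⟩ := hPre
  unfold Spec_calculate_violation_diff_py
  simp only [calculate_violation_diff_py, calculate_violation_diff_py_alt, pvPrevEq]
  rw [pvA_loop1, pvA_loop2, pvB_loop _ _ _ hC]
  simp only []
  rw [pvValues_fold]
  rw [pvResolved_split _ _ hP hC]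
  simp only [zero_add]
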